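-- pv_equiv track=rewrite | github.com/Kihyun11/A-framework-for-rapid-prediction-of-volatile-chemical-dispersion | model1_PIGNN/src/make_split.py | group_ids
-- ===== SOURCE A (Python) =====
-- from typing import Dict, List, Tuple
--
-- def base_id_from_chem_id(chem_id: str) -> str:
--     parts = str(chem_id).split("_")
--     if len(parts) < 2:
--         return str(chem_id)
--     return "_".join(parts[:-1])
--
-- def group_ids(chem_ids: List[str]) -> Dict[str, List[str]]:
--     groups: Dict[str, List[str]] = {}
--     for cid in chem_ids:
--         base = base_id_from_chem_id(cid)
--         groups.setdefault(base, []).append(str(cid))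
--     for k in groups:
--         groups[k] = sorted(groups[k])
--     return groups
-- ===== SOURCE B (Python) =====
-- from typing import Dict, List
--
-- def base_id_from_chem_id(chem_id: str) -> str:
--     parts = str(chem_id).split("_")
--     if len(parts) < 2:
--         return str(chem_id)
--     return "_".join(parts[:-1])
--
-- def group_ids(chem_ids: List[str]) -> Dict[str, List[str]]:
--     ids = [str(c) for c in chem_ids]
--     bases = [base_id_from_chem_id(s) for s in ids]
--     keys = list(dict.fromkeys(bases))
--     return {b: sorted(s for s, bb in zip(ids, bases) if bb == b)
--             for b in keys}
-- ===== Notes on version B (the rewrite author's own statement) =====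
-- stated objective: alternative
-- what changed: Replaces the incremental setdefault-dict with in-place per-key sorting by a declarative pipeline: compute all base ids once, dedup them for the key order, and build the result as a dict comprehension that filters-and-sorts each group from the zipped (id, base) list.
import Mathlib
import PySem

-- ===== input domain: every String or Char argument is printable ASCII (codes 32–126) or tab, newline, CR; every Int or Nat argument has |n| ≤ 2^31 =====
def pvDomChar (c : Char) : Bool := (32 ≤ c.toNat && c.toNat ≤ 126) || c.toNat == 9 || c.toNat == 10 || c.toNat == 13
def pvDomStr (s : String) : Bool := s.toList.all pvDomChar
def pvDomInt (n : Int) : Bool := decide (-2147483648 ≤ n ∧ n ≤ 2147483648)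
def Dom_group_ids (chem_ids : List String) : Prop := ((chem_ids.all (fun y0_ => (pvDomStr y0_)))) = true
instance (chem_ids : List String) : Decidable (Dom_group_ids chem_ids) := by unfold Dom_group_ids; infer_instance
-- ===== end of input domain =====

-- B replaces the incremental setdefault dict + per-key sort loop with a declarative
-- pipeline (dedup of the base ids, then filter-and-sort per key); alternative, not faster.

-- ===== PORT A =====
-- shared helper: base_id_from_chem_id (identical in both Python sources; str(s) = s on strings)
def baseIdFromChemId (chem_id : String) : String :=
  -- str(chem_id).split("_"): sep "_" ≠ "" so split? always returns some; getD [] is never taken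
  let parts := (PySem.Str.split? chem_id "_").getD []
  if parts.length < 2 then chem_id
  else PySem.Str.join "_" (PySem.List.slice parts none (some (-1)))

-- groups.setdefault(base, []).append(str(cid)) sets groups[base] = groups.get(base, []) + [cid],
-- which is Dict.modify; the second loop rewrites each present key's value to its sorted form.
def group_ids (chem_ids : List String) : List (String × List String) :=
  let groups : PySem.Dict String (List String) :=
    chem_ids.foldl (fun g cid => g.modify (baseIdFromChemId cid) [] (· ++ [cid])) PySem.Dict.empty
  -- for k in groups: groups[k] = sorted(groups[k]); k is always present so get(k, []) = groups[k]
  let groups2 :=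
    groups.keys.foldl (fun g k => g.modify k [] (fun v => PySem.List.sorted v (fun x => x) false)) groups
  groups2.items

-- ===== PORT B =====
def group_ids_alt (chem_ids : List String) : List (String × List String) :=
  let ids := chem_ids.map (fun c => c)       -- [str(c) for c in chem_ids]; str is identity on str
  let bases := ids.map baseIdFromChemId
  let keys := PySem.List.dedup bases          -- list(dict.fromkeys(bases))
  keys.map (fun b =>
    (b, PySem.List.sorted (((ids.zip bases).filter (fun p => p.2 == b)).map (·.1)) (fun x => x) false))

-- ===== PRECONDITION & SPEC =====
def Spec_group_ids (chem_ids : List String) (out : List (String × List String)) : Prop := out = group_ids_alt chem_ids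
instance (chem_ids : List String) (out : List (String × List String)) : Decidable (Spec_group_ids chem_ids out) := by unfold Spec_group_ids; infer_instance

-- ===== CLAIM (what is proved, stated in full; the proofs are below) =====
def Claim_equal_group_ids : Prop := ∀ (chem_ids : List String), Dom_group_ids chem_ids → Spec_group_ids chem_ids (group_ids chem_ids)

-- ===== LEMMAS AND PROOFS =====

-- Set.add-folding over elements already present is the identity
theorem foldl_add_of_subset (xs s : List String) (h : ∀ x ∈ xs, x ∈ s) :
    List.foldl PySem.Set.add s xs = s := by
  induction xs generalizing s with
  | nil => rfl
  | cons a t ih =>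
    have ha : PySem.Set.contains s a = true := by
      simp [PySem.Set.contains, h a (by simp)]
    simp only [List.foldl_cons, PySem.Set.add, ha, if_true]
    exact ih s (fun x hx => h x (List.mem_cons_of_mem _ hx))

-- project the second components of the key-tagged filtered list
theorem map_snd_filter (f : String → String) (xs : List String) (k : String) :
    (((xs.map (fun c => (f c, c))).filter (fun p => p.1 == k)).map (·.2))
      = xs.filter (fun c => f c == k) := by
  induction xs with
  | nil => rfl
  | cons x t ih =>
    simp only [List.map_cons, List.filter_cons]
    by_cases h : f x == k <;> simp [h, ih]

-- zip-filter-project is a plain filter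
theorem zip_filter_snd (f : String → String) (xs : List String) (b : String) :
    (((xs.zip (xs.map f)).filter (fun p => p.2 == b)).map (·.1))
      = xs.filter (fun c => f c == b) := by
  induction xs with
  | nil => rfl
  | cons x t ih =>
    simp only [List.map_cons, List.zip_cons_cons, List.filter_cons]
    by_cases h : f x == b <;> simp [h, ih]

-- the grouping fold, characterised via getD
theorem getD_phase1 (f : String → String) (xs : List String)
    (d : PySem.Dict String (List String)) (k : String) :
    (xs.foldl (fun g cid => g.modify (f cid) [] (· ++ [cid])) d).getD k []
      = d.getD k [] ++ xs.filter (fun c => f c == k) := by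
  have h := PySem.Dict.getD_foldl_modify_append (l := xs.map (fun c => (f c, c))) (d := d) (c := k)
  rw [List.foldl_map] at h
  rw [h]
  congr 1
  exact map_snd_filter f xs k

-- the rewrite loop over a Nodup key list applies f at exactly the listed keys
theorem getD_phase2 (ks : List String) (hnd : ks.Nodup)
    (g : PySem.Dict String (List String)) (F : List String → List String) (k : String) :
    (ks.foldl (fun d k' => d.modify k' [] F) g).getD k []
      = if k ∈ ks then F (g.getD k []) else g.getD k [] := by
  induction ks generalizing g with
  | nil => simp
  | cons a t ih =>
    have hnd' : t.Nodup := hnd.of_cons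
    have ha : a ∉ t := by simpa using (List.nodup_cons.mp hnd).1
    simp only [List.foldl_cons]
    rw [ih hnd']
    by_cases hk : k = a
    · subst hk
      simp [ha, PySem.Dict.getD_modify_self]
    · by_cases hmem : k ∈ t <;>
        simp [hmem, hk, PySem.Dict.getD_modify]

theorem group_ids_eq (chem_ids : List String) :
    group_ids chem_ids = group_ids_alt chem_ids := by
  unfold group_ids group_ids_alt
  simp only [List.map_id']
  set f := baseIdFromChemId with hf
  set g1 := chem_ids.foldl (fun g cid => g.modify (f cid) [] (· ++ [cid])) PySem.Dict.empty with hg1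
  -- keys of g1 are the deduped base ids, Nodup
  have hkeys : g1.keys = PySem.List.dedup (chem_ids.map f) := by
    rw [hg1, PySem.Dict.keys_foldl_modify_key]
    simp [PySem.List.dedup_eq_ofList, PySem.Set.update, PySem.Dict.keys_empty,
      PySem.Set.ofList, PySem.Set.empty]
  have hnd : g1.keys.Nodup := by
    rw [hkeys]; exact PySem.List.nodup_dedup _
  set F : List String → List String := fun v => PySem.List.sorted v (fun x => x) false with hF
  set g2 := g1.keys.foldl (fun d k => d.modify k [] F) g1 with hg2
  have hkeys2 : g2.keys = g1.keys := by
    rw [hg2, PySem.Dict.keys_foldl_modify]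
    exact foldl_add_of_subset _ _ (fun x hx => hx)
  have hnd2 : g2.keys.Nodup := hkeys2 ▸ hnd
  have hitems : g2.items = g2.keys.map (fun k => (k, g2.getD k [])) :=
    PySem.Dict.items_eq_map_keys g2 hnd2 []
  rw [hitems, hkeys2, hkeys]
  apply List.map_congr_left
  intro b hb
  have hbk : b ∈ g1.keys := by rw [hkeys]; exact hb
  have h2 : g2.getD b [] = F (g1.getD b []) := by
    rw [hg2, getD_phase2 _ hnd]
    simp [hbk]
  have h1 : g1.getD b [] = chem_ids.filter (fun c => f c == b) := by
    rw [hg1, getD_phase1]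
    simp [PySem.Dict.getD_empty]
  rw [h2, h1, zip_filter_snd]

-- ===== VERDICT (by name: the statement is the Claim_ definition above) =====
theorem group_ids_spec : Claim_equal_group_ids := by
  intro chem_ids _
  unfold Spec_group_ids
  exact group_ids_eq chem_ids
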